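-- pv_equiv track=rewrite | github.com/Blight-East/Meridian | runtime/safety/control_plane.py | _severity_for_markers
-- ===== SOURCE A (Python) =====
-- def _severity_for_markers(markers: list[str]) -> str:
--     if any(marker in {"credential_exfiltration", "secret_request"} for marker in markers):
--         return "critical"
--     if any(marker in {"instruction_override", "tool_execution", "command_channel_claim"} for marker in markers):
--         return "high"
--     if markers:
--         return "medium"
--     return "low"
-- ===== SOURCE B (Python) =====
-- _RANK = {
--     "credential_exfiltration": 3,
--     "secret_request": 3,
--     "instruction_override": 2,
--     "tool_execution": 2,
--     "command_channel_claim": 2,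
-- }
--
-- _LABELS = ("low", "medium", "high", "critical")
--
--
-- def _severity_for_markers(markers: list[str]) -> str:
--     best = 0
--     for marker in markers:
--         rank = _RANK.get(marker, 1)
--         if best < rank:
--             best = rank
--     return _LABELS[best]
-- ===== Notes on version B (the rewrite author's own statement) =====
-- stated objective: alternative
-- what changed: Replaced A's up-to-three short-circuit any-scans over the marker list by a single pass that keeps a running maximum severity rank (0-3) from a rank table and maps the final rank to its label.
import Mathlib
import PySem

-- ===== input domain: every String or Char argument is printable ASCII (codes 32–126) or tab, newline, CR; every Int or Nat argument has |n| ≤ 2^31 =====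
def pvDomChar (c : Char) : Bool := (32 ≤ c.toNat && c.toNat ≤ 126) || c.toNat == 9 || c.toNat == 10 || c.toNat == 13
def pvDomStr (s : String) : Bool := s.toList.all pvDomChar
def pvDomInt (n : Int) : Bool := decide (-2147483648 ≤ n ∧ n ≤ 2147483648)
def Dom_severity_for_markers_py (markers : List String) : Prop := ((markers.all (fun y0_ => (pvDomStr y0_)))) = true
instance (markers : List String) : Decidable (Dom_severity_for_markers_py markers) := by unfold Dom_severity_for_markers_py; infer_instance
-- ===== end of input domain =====

-- B replaces A's up-to-three short-circuit scans by one pass keeping a running maximum rank (alternative decomposition, same cost).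

-- ===== PORT A =====
def severity_for_markers_py (markers : List String) : String :=
  if markers.any (fun marker => (PySem.Set.ofList ["credential_exfiltration", "secret_request"]).contains marker) then
    "critical"
  else if markers.any (fun marker => (PySem.Set.ofList ["instruction_override", "tool_execution", "command_channel_claim"]).contains marker) then
    "high"
  else if markers.isEmpty = false then
    "medium"
  else
    "low"

-- ===== PORT B =====
def pvRank : PySem.Dict String Nat :=
  PySem.Dict.ofList
    [("credential_exfiltration", 3), ("secret_request", 3),
     ("instruction_override", 2), ("tool_execution", 2), ("command_channel_claim", 2)]

def pvLabels : List String := ["low", "medium", "high", "critical"]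

def severity_for_markers_py_alt (markers : List String) : String :=
  let best := markers.foldl
    (fun best marker =>
      let rank := pvRank.getD marker 1
      if best < rank then rank else best) 0
  pvLabels.getD best "low"  -- tuple index: best is always 0..3

-- ===== PRECONDITION & SPEC =====
def Spec_severity_for_markers_py (markers : List String) (out : String) : Prop := out = severity_for_markers_py_alt markers
instance (markers : List String) (out : String) : Decidable (Spec_severity_for_markers_py markers out) := by unfold Spec_severity_for_markers_py; infer_instance

-- ===== CLAIM (what is proved, stated in full; the proofs are below) =====
def Claim_equal_severity_for_markers_py : Prop := ∀ (markers : List String), Dom_severity_for_markers_py markers → Spec_severity_for_markers_py markers (severity_for_markers_py markers)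

-- ===== LEMMAS AND PROOFS =====

def pvStep (best : Nat) (marker : String) : Nat :=
  if best < pvRank.getD marker 1 then pvRank.getD marker 1 else best

-- per-element value of the rank lookup
theorem pvRank_getD (m : String) :
    pvRank.getD m 1 =
      if m = "credential_exfiltration" ∨ m = "secret_request" then 3
      else if m = "instruction_override" ∨ m = "tool_execution" ∨ m = "command_channel_claim" then 2
      else 1 := by
  have h : pvRank = PySem.Dict.mk
      [("credential_exfiltration", 3), ("secret_request", 3),
       ("instruction_override", 2), ("tool_execution", 2), ("command_channel_claim", 2)] := by rfl
  rcases eq_or_ne m "credential_exfiltration" with h1 | h1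
  · subst h1; decide
  rcases eq_or_ne m "secret_request" with h2 | h2
  · subst h2; decide
  rcases eq_or_ne m "instruction_override" with h3 | h3
  · subst h3; decide
  rcases eq_or_ne m "tool_execution" with h4 | h4
  · subst h4; decide
  rcases eq_or_ne m "command_channel_claim" with h5 | h5
  · subst h5; decide
  have hfind : List.find? (fun p => p.1 == m)
      ([("credential_exfiltration", 3), ("secret_request", 3), ("instruction_override", 2),
        ("tool_execution", 2), ("command_channel_claim", 2)] : List (String × Nat)) = none := by
    rw [List.find?_eq_none]
    intro p hp
    simp only [List.mem_cons, List.not_mem_nil, or_false] at hp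
    rcases hp with h | h | h | h | h <;> subst h <;> simp_all [ne_comm]
  rw [h]
  simp [PySem.Dict.getD_eq_get?_getD, PySem.Dict.get?, hfind, h1, h2, h3, h4, h5]

theorem pvContains3 (m : String) :
    (PySem.Set.ofList ["credential_exfiltration", "secret_request"]).contains m =
      decide (m = "credential_exfiltration" ∨ m = "secret_request") := by
  simp [PySem.Set.contains, PySem.Set.mem_ofList]

theorem pvContains2 (m : String) :
    (PySem.Set.ofList ["instruction_override", "tool_execution", "command_channel_claim"]).contains m =
      decide (m = "instruction_override" ∨ m = "tool_execution" ∨ m = "command_channel_claim") := by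
  simp [PySem.Set.contains, PySem.Set.mem_ofList]

theorem fold_shift (l : List String) (b : Nat) :
    l.foldl pvStep b = max b (l.foldl pvStep 0) := by
  induction l generalizing b with
  | nil => simp
  | cons a l ih =>
    simp only [List.foldl_cons]
    rw [ih (pvStep b a), ih (pvStep 0 a)]
    unfold pvStep
    split_ifs <;> omega

-- the running maximum over the whole list, characterised by A's scans
theorem best_spec (markers : List String) :
    markers.foldl pvStep 0 =
      if markers.any (fun m => (PySem.Set.ofList ["credential_exfiltration", "secret_request"]).contains m) then 3
      else if markers.any (fun m => (PySem.Set.ofList ["instruction_override", "tool_execution", "command_channel_claim"]).contains m) then 2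
      else if markers.isEmpty then 0 else 1 := by
  induction markers with
  | nil => simp
  | cons a l ih =>
    simp only [List.foldl_cons, List.any_cons, List.isEmpty_cons]
    rw [fold_shift, ih]
    have hR : pvStep 0 a = pvRank.getD a 1 := by
      unfold pvStep; rw [pvRank_getD a]; split_ifs <;> omega
    rw [hR, pvRank_getD a, pvContains3 a, pvContains2 a]
    by_cases h3 : a = "credential_exfiltration" ∨ a = "secret_request" <;>
      by_cases h2 : a = "instruction_override" ∨ a = "tool_execution" ∨ a = "command_channel_claim" <;>
      simp [h3, h2] <;> split_ifs <;> omega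

-- ===== VERDICT (by name: the statement is the Claim_ definition above) =====
theorem severity_for_markers_py_spec : Claim_equal_severity_for_markers_py := by
  intro markers _
  unfold Spec_severity_for_markers_py severity_for_markers_py severity_for_markers_py_alt
  show _ = pvLabels.getD (markers.foldl pvStep 0) "low"
  rw [best_spec]
  split_ifs <;> simp_all [pvLabels]
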